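-- pv_equiv track=rewrite | github.com/chriscuber123/PyCube | tp.py | cornerParity
-- ===== SOURCE A (Python) =====
-- def cornerParity(corners, solved, swaps, twists):
--     sortedCorners = []
--     for corner in solved:
--         sortedCorners.append(sorted(corner))
--     if corners == []:
--         return swaps, twists
--     else:
--         if corners[0] == solved[0]:
--             return cornerParity(corners[1:], solved[1:], swaps, twists)
--         elif sorted(corners[0]) == sorted(solved[0]):
--             if 'white' in corners[0]:
--                 return cornerParity(corners[1:], solved[1:], swaps, twists+corners[0].index('white'))
--             else:
--                 return cornerParity(corners[1:], solved[1:], swaps, twists+corners[0].index('yellow'))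
--         else:
--             i = sortedCorners.index(sorted(corners[0]))
--             corners[0], corners[i] = corners[i], corners[0]
--             return cornerParity(corners, solved, swaps+1, twists)
-- ===== SOURCE B (Python) =====
-- def cornerParity(corners, solved, swaps, twists):
--     # Position of each corner's colour-set in the solved cube, built once.
--     pos = {}
--     for i, s in enumerate(solved):
--         pos[tuple(sorted(s))] = i
--     perm = [pos[tuple(sorted(c))] for c in corners]
--     # Twist offsets: one pass over the corners (a corner's contents never change,
--     # only its position, so its twist is independent of the swap order).
--     for c, p in zip(corners, perm):
--         if c != solved[p]:
--             twists += c.index('white') if 'white' in c else c.index('yellow')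
--     # Cycle sort of the integer permutation counts the swaps.
--     j = 0
--     while j < len(perm):
--         t = perm[j]
--         if t != j and perm[t] != t:
--             perm[j], perm[t] = perm[t], perm[j]
--             swaps += 1
--         else:
--             j += 1
--     return swaps, twists
-- ===== Notes on version B (the rewrite author's own statement) =====
-- stated objective: faster
-- what changed: A is a recursion that re-sorts every solved corner and rescans with list.index on each call, swapping corners in place and interleaving twist handling; B builds a dict from sorted colour-set to solved position once, sums the twist offsets in a single pass over the corners, and counts swaps by cycle-sorting the resulting integer permutation.
-- outside the precondition, e.g. on cornerParity([['a']], [['a'], ['b']], 0, 0): A returns (0, 0), B returns (0, 0)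
import Mathlib
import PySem

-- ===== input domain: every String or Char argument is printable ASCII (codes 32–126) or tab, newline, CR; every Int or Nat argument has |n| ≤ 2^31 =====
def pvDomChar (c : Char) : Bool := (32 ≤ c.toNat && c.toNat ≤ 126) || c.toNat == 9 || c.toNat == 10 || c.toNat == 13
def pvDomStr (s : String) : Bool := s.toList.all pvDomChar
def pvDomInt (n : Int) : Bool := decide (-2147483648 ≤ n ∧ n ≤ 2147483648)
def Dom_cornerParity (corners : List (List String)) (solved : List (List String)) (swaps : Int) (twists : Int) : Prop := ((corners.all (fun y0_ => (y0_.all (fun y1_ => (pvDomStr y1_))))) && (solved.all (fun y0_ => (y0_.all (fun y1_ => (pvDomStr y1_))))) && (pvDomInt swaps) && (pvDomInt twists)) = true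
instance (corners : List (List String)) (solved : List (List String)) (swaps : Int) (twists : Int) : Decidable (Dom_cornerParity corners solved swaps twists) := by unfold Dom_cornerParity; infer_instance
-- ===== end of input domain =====

-- B replaces A's quadratic recursion (re-sorting the solved list and scanning it with list.index
-- on every call) by a dict built once, one twist-summing pass and a cycle sort of the integer
-- permutation: measurably faster. Note: Python A swaps elements of `corners` in place (a caller
-- could observe that); B does not mutate its arguments — the equivalence proved here is about
-- the return value.

-- ===== PORT A =====
-- sorted(l) on lists of strings (compared, as in Python, by their code-point sequences)
def key (l : List String) : List String := PySem.List.sorted l (fun s => s.toList) false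

def goA : Nat → List (List String) → List (List String) → Int → Int → Int × Int
  | 0, _, _, swaps, twists => (swaps, twists)
  | fuel+1, corners, solved, swaps, twists =>
    let sortedCorners := solved.map key
    match corners with
    | [] => (swaps, twists)
    | c0 :: ct =>
      match solved with
      | [] => (swaps, twists)  -- Python raises IndexError (solved[0]); outside Pre_
      | s0 :: st =>
        if c0 = s0 then goA fuel ct st swaps twists
        else if key c0 = key s0 then
          match PySem.List.index? c0 "white" with
          | some k => goA fuel ct st swaps (twists + (k : Int))
          | none =>
            match PySem.List.index? c0 "yellow" with
            | some k => goA fuel ct st swaps (twists + (k : Int))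
            | none => (swaps, twists)  -- Python ValueError; outside Pre_
        else
          match PySem.List.index? sortedCorners (key c0) with
          | some i =>
            match (c0 :: ct)[i]? with
            | some ci => goA fuel (((c0 :: ct).set 0 ci).set i c0) (s0 :: st) (swaps + 1) twists
            | none => (swaps, twists)  -- Python IndexError; outside Pre_
          | none => (swaps, twists)    -- Python ValueError; outside Pre_

-- fuel 2n+1 suffices on Pre_ (proved below); outside Pre_ Python raises or recurses forever
def cornerParity (corners : List (List String)) (solved : List (List String)) (swaps : Int) (twists : Int) : Int × Int :=
  goA (2 * corners.length + 1) corners solved swaps twists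

-- ===== PORT B =====
-- pos = {tuple(sorted(s)): i for i, s in enumerate(solved)}
def bPos (solved : List (List String)) : PySem.Dict (List String) Int :=
  (PySem.List.enumerate solved 0).foldl (fun d p => d.insert (key p.2) p.1) PySem.Dict.empty

-- the twist-summing pass over zip(corners, perm)
def bTwists (solved : List (List String)) (pairs : List (List String × Int)) (twists : Int) : Int :=
  pairs.foldl (fun t cp =>
    match PySem.List.pyGet? solved cp.2 with
    | some s =>
      if cp.1 = s then t
      else match PySem.List.index? cp.1 "white" with
        | some k => t + (k : Int)
        | none =>
          match PySem.List.index? cp.1 "yellow" with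
          | some k => t + (k : Int)
          | none => t   -- Python ValueError; outside Pre_
    | none => t         -- unreachable: pos values are valid indices
  ) twists

-- the cycle-sort while loop; fuel 2n+2 suffices (each step fixes a position or advances j)
def bLoop : Nat → List Int → Nat → Int → Int
  | 0, _, _, swaps => swaps
  | fuel+1, perm, j, swaps =>
    if h : j < perm.length then
      let t := perm[j]
      if t = (j : Int) then bLoop fuel perm (j+1) swaps
      else if ht : 0 ≤ t ∧ t.toNat < perm.length then
        if perm[t.toNat]'ht.2 = t then bLoop fuel perm (j+1) swaps
        else bLoop fuel ((perm.set j (perm[t.toNat]'ht.2)).set t.toNat t) j (swaps + 1)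
      else swaps  -- Python IndexError for t ≥ len(perm); t < 0 is unreachable (dict values are ≥ 0)
    else swaps

def cornerParity_alt (corners : List (List String)) (solved : List (List String)) (swaps : Int) (twists : Int) : Int × Int :=
  (bLoop (2 * (corners.map (fun c => (bPos solved).getD (key c) 0)).length + 2)
     (corners.map (fun c => (bPos solved).getD (key c) 0)) 0 swaps,
   bTwists solved (corners.zip (corners.map (fun c => (bPos solved).getD (key c) 0))) twists)

-- ===== PRECONDITION & SPEC =====
-- Pre_ admits corners = [] and otherwise requires the sorted colour-sets of corners to be a
-- duplicate-free rearrangement of those of solved, every misplaced-but-oriented corner containing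
-- 'white' or 'yellow'; on other inputs A raises IndexError/ValueError or recurses forever, except
-- for accidental returns (duplicate colour-sets already in place, or corners a prefix-matching
-- strict sublist of solved) — see the claim's cites.
def Pre_cornerParity (corners : List (List String)) (solved : List (List String)) (swaps : Int) (twists : Int) : Prop :=
  corners = [] ∨
  ((solved.map key).Nodup ∧ (corners.map key).Perm (solved.map key) ∧
    ∀ c ∈ corners, ∀ s ∈ solved, key c = key s → c ≠ s → ("white" ∈ c ∨ "yellow" ∈ c))
instance (corners : List (List String)) (solved : List (List String)) (swaps : Int) (twists : Int) : Decidable (Pre_cornerParity corners solved swaps twists) := by unfold Pre_cornerParity; infer_instance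

def pvWitness_cornerParity : List (List String) × List (List String) × Int × Int :=
  ([["a", "white"], ["b", "yellow"]], [["white", "a"], ["b", "yellow"]], 0, 0)

def Spec_cornerParity (corners : List (List String)) (solved : List (List String)) (swaps : Int) (twists : Int) (out : Int × Int) : Prop := out = cornerParity_alt corners solved swaps twists
instance (corners : List (List String)) (solved : List (List String)) (swaps : Int) (twists : Int) (out : Int × Int) : Decidable (Spec_cornerParity corners solved swaps twists out) := by unfold Spec_cornerParity; infer_instance

-- ===== CLAIM (what is proved, stated in full; the proofs are below) =====
def Claim_equal_cornerParity : Prop := ∀ (corners : List (List String)) (solved : List (List String)) (swaps : Int) (twists : Int), Dom_cornerParity corners solved swaps twists → Pre_cornerParity corners solved swaps twists → Spec_cornerParity corners solved swaps twists (cornerParity corners solved swaps twists)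

-- ===== LEMMAS AND PROOFS =====

-- the invariant maintained through A's recursion (the nonempty case of Pre_)
def AInv (corners solved : List (List String)) : Prop :=
  (solved.map key).Nodup ∧ (corners.map key).Perm (solved.map key) ∧
    ∀ c ∈ corners, ∀ s ∈ solved, key c = key s → c ≠ s → ("white" ∈ c ∨ "yellow" ∈ c)

-- the permutation "position in corners ↦ position in solved of the same colour-set"
def permOf (corners solved : List (List String)) : List Int :=
  corners.map (fun c => (((solved.map key).idxOf (key c) : Nat) : Int))

def twistOf (c : List String) : Int :=
  match PySem.List.index? c "white" with
  | some k => (k : Int)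
  | none =>
    match PySem.List.index? c "yellow" with
    | some k => (k : Int)
    | none => 0

def contrib (solved : List (List String)) (c : List String) : Int :=
  match solved[(solved.map key).idxOf (key c)]? with
  | some s => if c = s then 0 else twistOf c
  | none => 0

def Tsum (corners solved : List (List String)) : Int := (corners.map (contrib solved)).sum

def mis (perm : List Int) : Nat :=
  (List.range perm.length).countP (fun (j : Nat) => decide (perm[j]? ≠ some (j : Int)))

theorem index?_mem {α : Type} [BEq α] [LawfulBEq α] (xs : List α) (v : α) (h : v ∈ xs) :
    PySem.List.index? xs v = some (xs.idxOf v) := by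
  rw [PySem.List.index?_eq_idxOf?]
  induction xs with
  | nil => simp at h
  | cons a t ih =>
    by_cases hv : a = v
    · subst hv; simp [List.idxOf?_cons, List.idxOf_cons_self]
    · rcases List.mem_cons.mp h with h | h
      · exact absurd h.symm hv
      · simp [List.idxOf?_cons, List.idxOf_cons_ne _ hv, hv, ih h]

theorem mis_le_length (perm : List Int) : mis perm ≤ perm.length := by
  have := List.countP_le_length
    (l := List.range perm.length) (p := fun (j : Nat) => decide (perm[j]? ≠ some (j : Int)))
  simpa [mis] using this

theorem length_permOf (corners solved : List (List String)) :
    (permOf corners solved).length = corners.length := by simp [permOf]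

theorem permOf_nodup (corners solved : List (List String))
    (hnd : (solved.map key).Nodup) (hperm : (corners.map key).Perm (solved.map key)) :
    (permOf corners solved).Nodup := by
  have hcnd : (corners.map key).Nodup := hperm.nodup_iff.mpr hnd
  have hrw : permOf corners solved
      = (corners.map key).map (fun k => (((solved.map key).idxOf k : Nat) : Int)) := by
    simp [permOf, List.map_map]
  rw [hrw]
  refine hcnd.map_on ?_
  intro x hx y hy hxy
  have hx' : x ∈ solved.map key := hperm.subset hx
  have hy' : y ∈ solved.map key := hperm.subset hy
  have hidx : (solved.map key).idxOf x = (solved.map key).idxOf y := by exact_mod_cast hxy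
  have e1 : (solved.map key)[(solved.map key).idxOf x]? = some x := by
    rw [List.getElem?_eq_getElem (List.idxOf_lt_length_of_mem hx'), List.getElem_idxOf]
  have e2 : (solved.map key)[(solved.map key).idxOf y]? = some y := by
    rw [List.getElem?_eq_getElem (List.idxOf_lt_length_of_mem hy'), List.getElem_idxOf]
  rw [hidx, e2] at e1
  exact (Option.some_injective _ e1).symm

theorem idxOf_key_cons (st : List (List String)) (s0 c : List String) (h : key c ≠ key s0) :
    (List.map key (s0 :: st)).idxOf (key c) = (st.map key).idxOf (key c) + 1 := by
  simpa using List.idxOf_cons_ne (st.map key) (fun hx => h hx.symm)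

theorem permOf_tail (ct st : List (List String)) (s0 : List String)
    (hnot : ∀ c ∈ ct, key c ≠ key s0) :
    permOf ct (s0 :: st) = (permOf ct st).map (· + 1) := by
  unfold permOf
  rw [List.map_map]
  refine List.map_congr_left ?_
  intro c hc
  have h2 := idxOf_key_cons st s0 c (hnot c hc)
  simp at h2
  simp [h2]

theorem contrib_cons_of_ne (st : List (List String)) (s0 c : List String)
    (h : key c ≠ key s0) : contrib (s0 :: st) c = contrib st c := by
  unfold contrib
  rw [idxOf_key_cons st s0 c h, List.getElem?_cons_succ]

theorem contrib_cons_self (st : List (List String)) (s0 c : List String)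
    (h : key c = key s0) : contrib (s0 :: st) c = if c = s0 then 0 else twistOf c := by
  unfold contrib
  simp [h, List.idxOf_cons_self]

theorem Tsum_cons (c0 : List String) (ct solved : List (List String)) :
    Tsum (c0 :: ct) solved = contrib solved c0 + Tsum ct solved := by simp [Tsum]

theorem Tsum_perm (corners corners' solved : List (List String)) (h : corners'.Perm corners) :
    Tsum corners' solved = Tsum corners solved := (h.map (contrib solved)).sum_eq

theorem Tsum_tail (ct st : List (List String)) (s0 : List String)
    (h : ∀ c ∈ ct, key c ≠ key s0) : Tsum ct (s0 :: st) = Tsum ct st := by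
  unfold Tsum
  congr 1
  refine List.map_congr_left ?_
  intro c hc
  exact contrib_cons_of_ne st s0 c (h c hc)

theorem set_set_perm {α : Type} (a : α) (m : List α) (k : Nat) (hk : k < m.length) :
    (((a :: m).set 0 (m[k]'hk)).set (k+1) a).Perm (a :: m) := by
  have h1 : ((a :: m).set 0 (m[k]'hk)).set (k+1) a = m[k]'hk :: m.set k a := by simp
  rw [h1]
  have hset : m.set k a = m.take k ++ a :: m.drop (k+1) := List.set_eq_take_cons_drop a hk
  have hm : m = m.take k ++ m[k]'hk :: m.drop (k+1) := by
    conv_lhs => rw [← List.take_append_drop k m, List.drop_eq_getElem_cons hk]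
  rw [hset]
  refine List.Perm.trans (List.Perm.cons _ List.perm_middle) ?_
  refine List.Perm.trans (List.Perm.swap _ _ _) ?_
  refine List.Perm.trans (List.Perm.cons _ List.perm_middle.symm) ?_
  rw [← hm]

-- step equations for bLoop
theorem bLoop_succ_exit (f : Nat) (perm : List Int) (j : Nat) (s : Int)
    (h : ¬ j < perm.length) : bLoop (f+1) perm j s = s := by
  simp only [bLoop]
  rw [dif_neg h]

theorem bLoop_succ_adv (f : Nat) (perm : List Int) (j : Nat) (s : Int)
    (h : j < perm.length) (he : perm[j]'h = (j : Int)) :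
    bLoop (f+1) perm j s = bLoop f perm (j+1) s := by
  simp only [bLoop]
  rw [dif_pos h, if_pos he]

theorem bLoop_succ_skip (f : Nat) (perm : List Int) (j : Nat) (s : Int)
    (h : j < perm.length) (hne : perm[j]'h ≠ (j : Int))
    (ht : 0 ≤ perm[j]'h ∧ (perm[j]'h).toNat < perm.length)
    (htt : perm[(perm[j]'h).toNat]'ht.2 = perm[j]'h) :
    bLoop (f+1) perm j s = bLoop f perm (j+1) s := by
  simp only [bLoop]
  rw [dif_pos h, if_neg hne, dif_pos ht, if_pos htt]

theorem bLoop_succ_swap (f : Nat) (perm : List Int) (j : Nat) (s : Int)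
    (h : j < perm.length) (hne : perm[j]'h ≠ (j : Int))
    (ht : 0 ≤ perm[j]'h ∧ (perm[j]'h).toNat < perm.length)
    (htt : perm[(perm[j]'h).toNat]'ht.2 ≠ perm[j]'h) :
    bLoop (f+1) perm j s
      = bLoop f ((perm.set j (perm[(perm[j]'h).toNat]'ht.2)).set (perm[j]'h).toNat (perm[j]'h)) j (s+1) := by
  simp only [bLoop]
  rw [dif_pos h, if_neg hne, dif_pos ht, if_neg htt]

theorem bLoop_succ_bad (f : Nat) (perm : List Int) (j : Nat) (s : Int)
    (h : j < perm.length) (hne : perm[j]'h ≠ (j : Int))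
    (ht : ¬ (0 ≤ perm[j]'h ∧ (perm[j]'h).toNat < perm.length)) :
    bLoop (f+1) perm j s = s := by
  simp only [bLoop]
  rw [dif_pos h, if_neg hne, dif_neg ht]

theorem bLoop_shift (f : Nat) (a : Int) (q : List Int) (hq : ∀ x ∈ q, 0 ≤ x) (j : Nat) (s : Int) :
    bLoop f (a :: q.map (· + 1)) (j+1) s = bLoop f q j s := by
  induction f generalizing q j s with
  | zero => rfl
  | succ f ih =>
    by_cases h : j < q.length
    · have hL : j + 1 < (a :: q.map (· + 1)).length := by simp; omega
      have hget : (a :: q.map (· + 1))[j+1]'hL = q[j]'h + 1 := by simp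
      by_cases heq : q[j]'h = (j : Int)
      · rw [bLoop_succ_adv f _ _ s hL (by rw [hget, heq]; push_cast; ring),
          bLoop_succ_adv f _ _ s h heq]
        exact ih q hq (j+1) s
      · have hq0 : 0 ≤ q[j]'h := hq _ (List.getElem_mem h)
        by_cases ht : 0 ≤ q[j]'h ∧ (q[j]'h).toNat < q.length
        · have htn : (q[j]'h + 1).toNat = (q[j]'h).toNat + 1 := by omega
          have htL : 0 ≤ (a :: q.map (· + 1))[j+1]'hL
              ∧ ((a :: q.map (· + 1))[j+1]'hL).toNat < (a :: q.map (· + 1)).length := by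
            rw [hget]; constructor
            · omega
            · simp [htn]; omega
          have hgt : (a :: q.map (· + 1))[((a :: q.map (· + 1))[j+1]'hL).toNat]'htL.2
              = q[(q[j]'h).toNat]'ht.2 + 1 := by
            simp [hget, htn]
          by_cases htt : q[(q[j]'h).toNat]'ht.2 = q[j]'h
          · rw [bLoop_succ_skip f _ _ s hL (by rw [hget]; push_cast; omega) htL
                (by rw [hgt, hget, htt]),
              bLoop_succ_skip f _ _ s h heq ht htt]
            exact ih q hq (j+1) s
          · rw [bLoop_succ_swap f _ _ s hL (by rw [hget]; push_cast; omega) htL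
                (by rw [hgt, hget]; intro hcon; exact htt (by omega)),
              bLoop_succ_swap f _ _ s h heq ht htt]
            have hlist : ((a :: q.map (· + 1)).set (j+1)
                  ((a :: q.map (· + 1))[((a :: q.map (· + 1))[j+1]'hL).toNat]'htL.2)).set
                    (((a :: q.map (· + 1))[j+1]'hL).toNat) ((a :: q.map (· + 1))[j+1]'hL)
                = a :: ((q.set j (q[(q[j]'h).toNat]'ht.2)).set ((q[j]'h).toNat) (q[j]'h)).map (· + 1) := by
              rw [hgt, hget]
              simp [htn, List.map_set]
            rw [hlist]
            refine ih _ ?_ j (s+1)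
            intro x hx
            rcases List.mem_or_eq_of_mem_set hx with hx' | hx'
            · rcases List.mem_or_eq_of_mem_set hx' with hx'' | hx''
              · exact hq x hx''
              · subst hx''; exact hq _ (List.getElem_mem ht.2)
            · subst hx'; exact hq0
        · rw [bLoop_succ_bad f _ _ s hL (by rw [hget]; push_cast; omega)
              (by rw [hget]; simp only [List.length_cons, List.length_map]; omega),
            bLoop_succ_bad f _ _ s h heq ht]
    · have hL : ¬ (j + 1 < (a :: q.map (· + 1)).length) := by simp; omega
      rw [bLoop_succ_exit f _ _ s hL, bLoop_succ_exit f _ _ s h]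

theorem mis_cons_zero (q : List Int) : mis ((0 : Int) :: q.map (· + 1)) = mis q := by
  unfold mis
  simp only [List.length_cons, List.length_map, List.range_succ_eq_map, List.countP_cons,
    List.countP_map]
  rw [if_neg (by simp)]
  rw [Nat.add_zero]
  refine List.countP_congr ?_
  intro j hj
  have hjl : j < q.length := List.mem_range.mp hj
  have e1 : ((0:Int) :: q.map (· + 1))[j.succ]? = some (q[j]'hjl + 1) := by
    simp [List.getElem?_eq_getElem (by simpa using hjl : j < (q.map (· + 1)).length)]
  simp only [Function.comp_apply, e1, List.getElem?_eq_getElem hjl, ne_eq, Option.some_inj,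
    decide_eq_true_eq]
  push_cast
  omega

theorem mis_swap (P : List Int) (i : Nat) (hi : i < P.length) (h0 : 0 < P.length)
    (hP0 : P[0]'h0 = (i : Int)) (hne : i ≠ 0) (hPi : P[i]'hi ≠ (i : Int)) :
    mis ((P.set 0 (P[i]'hi)).set i (i : Int)) + 1 ≤ mis P := by
  unfold mis
  set P' := (P.set 0 (P[i]'hi)).set i (i : Int) with hP'
  have hlen : P'.length = P.length := by simp [hP']
  rw [hlen]
  set p := fun (j : Nat) => decide (P[j]? ≠ some (j : Int)) with hp
  set p' := fun (j : Nat) => decide (P'[j]? ≠ some (j : Int)) with hp'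
  have himp : ∀ j ∈ List.range P.length, p' j → (p j && decide (j ≠ i)) := by
    intro j hj hpj
    have hjl : j < P.length := List.mem_range.mp hj
    by_cases hji : j = i
    · exfalso
      subst hji
      have hv : P'[j]? = some (j : Int) := by
        rw [hP']
        exact List.getElem?_set_self (by simpa using hjl)
      have hpt : p' j = true := hpj
      rw [hp'] at hpt
      simp [hv] at hpt
    · by_cases hj0 : j = 0
      · subst hj0
        have e0 : P[0]? = some (i : Int) := by rw [List.getElem?_eq_getElem h0, hP0]
        have hpt : p 0 = true := by
          simp only [hp, e0, ne_eq, Option.some_inj, decide_eq_true_eq]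
          intro hcon
          exact hne (by exact_mod_cast hcon)
        rw [hpt]
        simp [hji]
      · have hsame : P'[j]? = P[j]? := by
          rw [hP', List.getElem?_set_ne (fun hc => hji hc.symm), List.getElem?_set_ne (fun hc => hj0 hc.symm)]
        simp only [hp', hsame] at hpj
        have hpt : p j = true := hpj
        rw [hpt]
        simp [hji]
  have h1 : (List.range P.length).countP p' ≤ (List.range P.length).countP (fun j => p j && decide (j ≠ i)) :=
    List.countP_mono_left himp
  obtain ⟨l1, l2, hsplit⟩ := List.mem_iff_append.mp (List.mem_range.mpr hi)
  have hpi : p i = true := by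
    simp only [hp, List.getElem?_eq_getElem hi, ne_eq, Option.some_inj, decide_eq_true_eq]
    exact fun hcon => hPi hcon
  have h2 : (List.range P.length).countP (fun j => p j && decide (j ≠ i)) + 1
      ≤ (List.range P.length).countP p := by
    rw [hsplit, List.countP_append, List.countP_append, List.countP_cons, List.countP_cons,
      hpi]
    have e1 : (if (true && decide (i ≠ i)) = true then 1 else 0) = 0 := by simp
    have e2 : (if (true : Bool) = true then 1 else 0) = 1 := by simp
    rw [e1, e2]
    have hmono1 : l1.countP (fun j => p j && decide (j ≠ i)) ≤ l1.countP p :=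
      List.countP_mono_left (by intro a _ hh; exact (Bool.and_elim_left hh))
    have hmono2 : l2.countP (fun j => p j && decide (j ≠ i)) ≤ l2.countP p :=
      List.countP_mono_left (by intro a _ hh; exact (Bool.and_elim_left hh))
    omega
  omega

-- step equations for goA
theorem goA_succ_nil (f : Nat) (solved : List (List String)) (s t : Int) :
    goA (f+1) [] solved s t = (s, t) := by
  cases solved <;> rfl

theorem goA_succ_eq (f : Nat) (c0 s0 : List String) (ct st : List (List String)) (s t : Int)
    (h : c0 = s0) : goA (f+1) (c0 :: ct) (s0 :: st) s t = goA f ct st s t := by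
  rw [goA]
  simp only [if_pos h]

theorem goA_succ_twist_white (f : Nat) (c0 s0 : List String) (ct st : List (List String))
    (s t : Int) (k : Nat) (hne : ¬ c0 = s0) (hk : key c0 = key s0)
    (hw : PySem.List.index? c0 "white" = some k) :
    goA (f+1) (c0 :: ct) (s0 :: st) s t = goA f ct st s (t + (k : Int)) := by
  rw [goA]
  simp only [if_neg hne, if_pos hk, hw]

theorem goA_succ_twist_yellow (f : Nat) (c0 s0 : List String) (ct st : List (List String))
    (s t : Int) (k : Nat) (hne : ¬ c0 = s0) (hk : key c0 = key s0)
    (hw : PySem.List.index? c0 "white" = none)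
    (hy : PySem.List.index? c0 "yellow" = some k) :
    goA (f+1) (c0 :: ct) (s0 :: st) s t = goA f ct st s (t + (k : Int)) := by
  rw [goA]
  simp only [if_neg hne, if_pos hk, hw, hy]

theorem goA_succ_swap (f : Nat) (c0 s0 : List String) (ct st : List (List String))
    (s t : Int) (i : Nat) (ci : List String) (hne : ¬ c0 = s0) (hk : ¬ key c0 = key s0)
    (hidx : PySem.List.index? ((s0 :: st).map key) (key c0) = some i)
    (hget : (c0 :: ct)[i]? = some ci) :
    goA (f+1) (c0 :: ct) (s0 :: st) s t
      = goA f (((c0 :: ct).set 0 ci).set i c0) (s0 :: st) (s + 1) t := by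
  rw [goA]
  simp only [if_neg hne, if_neg hk, hidx, hget]

theorem permOf_nonneg (corners solved : List (List String)) :
    ∀ x ∈ permOf corners solved, 0 ≤ x := by
  intro x hx
  unfold permOf at hx
  obtain ⟨c, _, rfl⟩ := List.mem_map.mp hx
  positivity

theorem main_lemma : ∀ (fA fB : Nat) (corners solved : List (List String)) (swaps twists : Int),
    AInv corners solved →
    corners.length + mis (permOf corners solved) < fA →
    corners.length + mis (permOf corners solved) < fB →
    goA fA corners solved swaps twists
      = (bLoop fB (permOf corners solved) 0 swaps, twists + Tsum corners solved) := by
  intro fA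
  induction fA with
  | zero => intro fB c s sw tw _ hA _; omega
  | succ fA ih =>
    intro fB corners solved swaps twists hInv hA hB
    obtain ⟨hnd, hperm, htw⟩ := hInv
    obtain ⟨fB', rfl⟩ : ∃ f', fB = f' + 1 := ⟨fB - 1, by omega⟩
    cases corners with
    | nil =>
      rw [goA_succ_nil]
      rw [bLoop_succ_exit fB' _ 0 swaps (by simp [permOf])]
      simp [Tsum]
    | cons c0 ct =>
      have hlen : ct.length + 1 = solved.length := by simpa using hperm.length_eq
      cases solved with
      | nil => simp at hlen
      | cons s0 st =>
        have hstlen : ct.length = st.length := by simpa using hlen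
        have hmemc0 : key c0 ∈ (s0 :: st).map key := hperm.subset (by simp)
        have hidxlt : ((s0 :: st).map key).idxOf (key c0) < ((s0 :: st).map key).length :=
          List.idxOf_lt_length_of_mem hmemc0
        have hgetidx : ((s0 :: st).map key)[((s0 :: st).map key).idxOf (key c0)]'hidxlt = key c0 :=
          List.getElem_idxOf hidxlt
        have hPlen : (permOf (c0 :: ct) (s0 :: st)).length = ct.length + 1 := by
          simp [length_permOf]
        have h0P : 0 < (permOf (c0 :: ct) (s0 :: st)).length := by omega
        have hP0 : (permOf (c0 :: ct) (s0 :: st))[0]'h0P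
            = ((((s0 :: st).map key).idxOf (key c0) : Nat) : Int) := by
          simp [permOf]
        by_cases hkey : key c0 = key s0
        · -- the head is consumed (equal or twisted)
          have hidx0 : (key s0 :: st.map key).idxOf (key c0) = 0 := by
            rw [hkey]
            exact List.idxOf_cons_self
          have hperm' : (ct.map key).Perm (st.map key) := by
            have h2 : (key c0 :: ct.map key).Perm (key s0 :: st.map key) := by
              simpa using hperm
            rw [hkey] at h2
            exact h2.cons_inv
          have hnd' : (st.map key).Nodup := by
            have : (key s0 :: st.map key).Nodup := by simpa using hnd
            exact this.of_cons
          have hnots0 : key s0 ∉ st.map key := by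
            have : (key s0 :: st.map key).Nodup := by simpa using hnd
            exact (List.nodup_cons.mp this).1
          have hnot : ∀ c ∈ ct, key c ≠ key s0 := by
            intro c hc he
            exact hnots0 (he ▸ hperm'.subset (List.mem_map_of_mem hc))
          have hPshape : permOf (c0 :: ct) (s0 :: st) = (0 : Int) :: (permOf ct st).map (· + 1) := by
            have ht := permOf_tail ct st s0 hnot
            unfold permOf at ht ⊢
            simp only [List.map_cons] at ht ⊢
            rw [hidx0]
            simp only [Nat.cast_zero]
            rw [ht]
          have hmis : mis (permOf (c0 :: ct) (s0 :: st)) = mis (permOf ct st) := by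
            rw [hPshape]; exact mis_cons_zero _
          have hInv' : AInv ct st :=
            ⟨hnd', hperm', fun c hc s hs hk2 hne2 => htw c (by simp [hc]) s (by simp [hs]) hk2 hne2⟩
          have hA' : ct.length + mis (permOf ct st) < fA := by
            rw [hmis] at hA
            simp only [List.length_cons] at hA
            omega
          have hB' : ct.length + mis (permOf ct st) < fB' := by
            rw [hmis] at hB
            simp only [List.length_cons] at hB
            omega
          have hstep : bLoop (fB'+1) (permOf (c0 :: ct) (s0 :: st)) 0 swaps
              = bLoop fB' (permOf ct st) 0 swaps := by
            rw [hPshape]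
            rw [bLoop_succ_adv fB' _ 0 swaps (by simp) (by simp)]
            exact bLoop_shift fB' 0 _ (permOf_nonneg ct st) 0 swaps
          have hTsum : Tsum (c0 :: ct) (s0 :: st)
              = (if c0 = s0 then 0 else twistOf c0) + Tsum ct st := by
            rw [Tsum_cons, contrib_cons_self st s0 c0 hkey, Tsum_tail ct st s0 hnot]
          by_cases heq : c0 = s0
          · rw [goA_succ_eq fA c0 s0 ct st swaps twists heq]
            rw [ih fB' ct st swaps twists hInv' hA' hB']
            rw [hstep, hTsum, if_pos heq]
            ring_nf
          · have hwy := htw c0 (by simp) s0 (by simp) hkey heq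
            rcases hw : PySem.List.index? c0 "white" with _ | k
            · have hnw : "white" ∉ c0 := by
                rw [← PySem.List.index?_eq_none_iff]
                exact hw
              have hyel : "yellow" ∈ c0 := by
                rcases hwy with h | h
                · exact absurd h hnw
                · exact h
              have hy : PySem.List.index? c0 "yellow" = some (c0.idxOf "yellow") :=
                index?_mem c0 "yellow" hyel
              rw [goA_succ_twist_yellow fA c0 s0 ct st swaps twists _ heq hkey hw hy]
              rw [ih fB' ct st swaps (twists + (c0.idxOf "yellow" : Int)) hInv' hA' hB']
              rw [hstep, hTsum, if_neg heq]
              have htwof : twistOf c0 = (c0.idxOf "yellow" : Int) := by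
                unfold twistOf
                rw [hw, hy]
              rw [htwof]
              ring_nf
            · rw [goA_succ_twist_white fA c0 s0 ct st swaps twists k heq hkey hw]
              rw [ih fB' ct st swaps (twists + (k : Int)) hInv' hA' hB']
              rw [hstep, hTsum, if_neg heq]
              have htwof : twistOf c0 = (k : Int) := by
                unfold twistOf
                rw [hw]
              rw [htwof]
              ring_nf
        · -- swap step
          have hne0 : ¬ c0 = s0 := fun h => hkey (by rw [h])
          have hidxsome : PySem.List.index? ((s0 :: st).map key) (key c0)
              = some (((s0 :: st).map key).idxOf (key c0)) := index?_mem _ _ hmemc0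
          have hn0 : ((s0 :: st).map key).idxOf (key c0) ≠ 0 := by
            intro h
            have h2 : ((s0 :: st).map key)[((s0 :: st).map key).idxOf (key c0)]? = some (key c0) := by
              rw [List.getElem?_eq_getElem hidxlt, hgetidx]
            rw [h] at h2
            simp only [List.map_cons, List.getElem?_cons_zero, Option.some_inj] at h2
            exact hkey h2.symm
          have hnlt : ((s0 :: st).map key).idxOf (key c0) < (c0 :: ct).length := by
            simp only [List.length_map, List.length_cons] at hidxlt
            simp only [List.length_cons]
            omega
          have hget : (c0 :: ct)[((s0 :: st).map key).idxOf (key c0)]?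
              = some ((c0 :: ct)[((s0 :: st).map key).idxOf (key c0)]'hnlt) :=
            List.getElem?_eq_getElem hnlt
          rw [goA_succ_swap fA c0 s0 ct st swaps twists _ _ hne0 hkey hidxsome hget]
          have hnP : ((s0 :: st).map key).idxOf (key c0) < (permOf (c0 :: ct) (s0 :: st)).length := by
            rw [hPlen]
            simpa using hnlt
          have hP0' : (permOf (c0 :: ct) (s0 :: st))[0]'h0P
              = ((((s0 :: st).map key).idxOf (key c0) : Nat) : Int) := hP0
          have hmapset : permOf (((c0 :: ct).set 0 ((c0 :: ct)[((s0 :: st).map key).idxOf (key c0)]'hnlt)).set (((s0 :: st).map key).idxOf (key c0)) c0) (s0 :: st)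
              = ((permOf (c0 :: ct) (s0 :: st)).set 0
                  ((permOf (c0 :: ct) (s0 :: st))[((s0 :: st).map key).idxOf (key c0)]'hnP)).set
                  (((s0 :: st).map key).idxOf (key c0))
                  ((((s0 :: st).map key).idxOf (key c0) : Nat) : Int) := by
            unfold permOf
            rw [List.map_set, List.map_set]
            congr 1
            rw [List.getElem_map]
          have hpermset : (((c0 :: ct).set 0 ((c0 :: ct)[((s0 :: st).map key).idxOf (key c0)]'hnlt)).set (((s0 :: st).map key).idxOf (key c0)) c0).Perm (c0 :: ct) := by
            obtain ⟨k, hkk⟩ : ∃ k, ((s0 :: st).map key).idxOf (key c0) = k + 1 :=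
              ⟨((s0 :: st).map key).idxOf (key c0) - 1, by omega⟩
            have hkl : k < ct.length := by
              simp only [List.length_cons] at hnlt
              omega
            have hgetct : (c0 :: ct)[((s0 :: st).map key).idxOf (key c0)]'hnlt = ct[k]'hkl := by
              have e1 : (c0 :: ct)[((s0 :: st).map key).idxOf (key c0)]? = ct[k]? := by
                rw [hkk]
                exact List.getElem?_cons_succ
              rw [List.getElem?_eq_getElem hnlt, List.getElem?_eq_getElem hkl] at e1
              exact Option.some_injective _ e1
            rw [hgetct, hkk]
            exact set_set_perm c0 ct k hkl
          have hInv' : AInv (((c0 :: ct).set 0 ((c0 :: ct)[((s0 :: st).map key).idxOf (key c0)]'hnlt)).set (((s0 :: st).map key).idxOf (key c0)) c0) (s0 :: st) :=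
            ⟨hnd, (hpermset.map key).trans hperm,
             fun c hc s hs hk2 hne2 => htw c (hpermset.subset hc) s hs hk2 hne2⟩
          have hPnodup : (permOf (c0 :: ct) (s0 :: st)).Nodup := permOf_nodup _ _ hnd hperm
          have hPi_ne : (permOf (c0 :: ct) (s0 :: st))[((s0 :: st).map key).idxOf (key c0)]'hnP
              ≠ ((((s0 :: st).map key).idxOf (key c0) : Nat) : Int) := by
            intro h
            have heq2 : (permOf (c0 :: ct) (s0 :: st))[((s0 :: st).map key).idxOf (key c0)]'hnP
                = (permOf (c0 :: ct) (s0 :: st))[0]'h0P := by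
              rw [h, hP0']
            have := (List.Nodup.getElem_inj_iff hPnodup).mp heq2
            exact hn0 this
          have hmis := mis_swap (permOf (c0 :: ct) (s0 :: st)) (((s0 :: st).map key).idxOf (key c0))
            hnP h0P hP0' hn0 hPi_ne
          rw [← hmapset] at hmis
          have hlenset : (((c0 :: ct).set 0 ((c0 :: ct)[((s0 :: st).map key).idxOf (key c0)]'hnlt)).set (((s0 :: st).map key).idxOf (key c0)) c0).length = ct.length + 1 := by
            simp
          have hA' : (((c0 :: ct).set 0 ((c0 :: ct)[((s0 :: st).map key).idxOf (key c0)]'hnlt)).set (((s0 :: st).map key).idxOf (key c0)) c0).length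
              + mis (permOf (((c0 :: ct).set 0 ((c0 :: ct)[((s0 :: st).map key).idxOf (key c0)]'hnlt)).set (((s0 :: st).map key).idxOf (key c0)) c0) (s0 :: st)) < fA := by
            rw [hlenset]
            simp only [List.length_cons] at hA
            omega
          have hB' : (((c0 :: ct).set 0 ((c0 :: ct)[((s0 :: st).map key).idxOf (key c0)]'hnlt)).set (((s0 :: st).map key).idxOf (key c0)) c0).length
              + mis (permOf (((c0 :: ct).set 0 ((c0 :: ct)[((s0 :: st).map key).idxOf (key c0)]'hnlt)).set (((s0 :: st).map key).idxOf (key c0)) c0) (s0 :: st)) < fB' := by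
            rw [hlenset]
            simp only [List.length_cons] at hB
            omega
          rw [ih fB' _ (s0 :: st) (swaps + 1) twists hInv' hA' hB']
          have hstep : bLoop (fB'+1) (permOf (c0 :: ct) (s0 :: st)) 0 swaps
              = bLoop fB' (permOf (((c0 :: ct).set 0 ((c0 :: ct)[((s0 :: st).map key).idxOf (key c0)]'hnlt)).set (((s0 :: st).map key).idxOf (key c0)) c0) (s0 :: st)) 0 (swaps + 1) := by
            have htcond : 0 ≤ (permOf (c0 :: ct) (s0 :: st))[0]'h0P
                ∧ ((permOf (c0 :: ct) (s0 :: st))[0]'h0P).toNat < (permOf (c0 :: ct) (s0 :: st)).length := by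
              rw [hP0']
              constructor
              · positivity
              · rw [Int.toNat_natCast]
                exact hnP
            have htoN : ((permOf (c0 :: ct) (s0 :: st))[0]'h0P).toNat
                = ((s0 :: st).map key).idxOf (key c0) := by
              rw [hP0']; exact Int.toNat_natCast _
            have httP : (permOf (c0 :: ct) (s0 :: st))[((permOf (c0 :: ct) (s0 :: st))[0]'h0P).toNat]'htcond.2
                ≠ (permOf (c0 :: ct) (s0 :: st))[0]'h0P := by
              have e1 : (permOf (c0 :: ct) (s0 :: st))[((permOf (c0 :: ct) (s0 :: st))[0]'h0P).toNat]?
                  = (permOf (c0 :: ct) (s0 :: st))[((s0 :: st).map key).idxOf (key c0)]? := by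
                rw [htoN]
              rw [List.getElem?_eq_getElem htcond.2, List.getElem?_eq_getElem hnP] at e1
              have hval := Option.some_injective _ e1
              rw [hval, hP0']
              exact hPi_ne
            rw [bLoop_succ_swap fB' _ 0 swaps h0P
              (by rw [hP0']; exact_mod_cast hn0) htcond httP]
            rw [hmapset]
            congr 1
          rw [hstep, Tsum_perm _ _ _ hpermset]

theorem bPos_getD (solved : List (List String)) (hnd : (solved.map key).Nodup)
    (c : List String) (hc : key c ∈ solved.map key) :
    (bPos solved).getD (key c) 0 = (((solved.map key).idxOf (key c) : Nat) : Int) := by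
  have he : (PySem.List.enumerate solved 0).map (fun (p : Int × List String) => key p.2)
      = solved.map key := by
    rw [show (fun (p : Int × List String) => key p.2) = key ∘ (fun (p : Int × List String) => p.2)
      from rfl, ← List.map_map, PySem.List.map_snd_enumerate]
  have hitems : (bPos solved).items
      = (PySem.List.enumerate solved 0).map (fun p => (key p.2, p.1)) := by
    unfold bPos
    rw [PySem.Dict.items_foldl_insert_fresh (PySem.List.enumerate solved 0)
      (fun p => key p.2) (fun p => p.1) PySem.Dict.empty
      (fun a _ => PySem.Dict.contains_empty _) (he ▸ hnd)]
    rfl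
  have hn : (solved.map key).idxOf (key c) < (solved.map key).length :=
    List.idxOf_lt_length_of_mem hc
  have hnl : (solved.map key).idxOf (key c) < solved.length := by simpa using hn
  have hk : (bPos solved).keys = solved.map key := by
    show (bPos solved).items.map (·.1) = solved.map key
    rw [hitems, List.map_map]
    exact he
  have hmem : (key c, (((solved.map key).idxOf (key c) : Nat) : Int)) ∈ (bPos solved).items := by
    rw [hitems]
    refine List.mem_map.mpr ⟨(0 + ((solved.map key).idxOf (key c) : Int),
      solved[(solved.map key).idxOf (key c)]'hnl), ?_, ?_⟩
    · rw [PySem.List.mem_enumerate_iff]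
      exact ⟨(solved.map key).idxOf (key c), hnl, rfl⟩
    · have hkc : key (solved[(solved.map key).idxOf (key c)]'hnl) = key c := by
        have hg := List.getElem_idxOf hn
        rw [List.getElem_map] at hg
        exact hg
      simp [hkc]
  exact PySem.Dict.getD_of_mem_items _ hmem (hk ▸ hnd) 0

theorem perm_eq (corners solved : List (List String)) (hnd : (solved.map key).Nodup)
    (hsub : ∀ c ∈ corners, key c ∈ solved.map key) :
    corners.map (fun c => (bPos solved).getD (key c) 0) = permOf corners solved := by
  unfold permOf
  refine List.map_congr_left ?_
  intro c hc
  exact bPos_getD solved hnd c (hsub c hc)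

theorem bTwists_eq (corners solved : List (List String)) (twists : Int) :
    bTwists solved (corners.zip (permOf corners solved)) twists
      = twists + Tsum corners solved := by
  unfold bTwists Tsum permOf
  have hzip : corners.zip (corners.map fun c => (((solved.map key).idxOf (key c) : Nat) : Int))
      = corners.map (fun c => (c, (((solved.map key).idxOf (key c) : Nat) : Int))) := by
    have h1 := List.zip_map' (f := fun (x : List String) => x)
      (g := fun c => (((solved.map key).idxOf (key c) : Nat) : Int)) (l := corners)
    simpa using h1
  rw [hzip, List.foldl_map]
  dsimp only
  have hbody : ∀ (t : Int) (c : List String), c ∈ corners →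
      (match PySem.List.pyGet? solved ((((solved.map key).idxOf (key c) : Nat) : Int)) with
       | some s =>
         if c = s then t
         else match PySem.List.index? c "white" with
           | some k => t + (k : Int)
           | none =>
             match PySem.List.index? c "yellow" with
             | some k => t + (k : Int)
             | none => t
       | none => t)
      = t + contrib solved c := by
    intro t c _
    rw [PySem.List.pyGet?_natCast]
    unfold contrib twistOf
    rcases hs : solved[(solved.map key).idxOf (key c)]? with _ | s
    · dsimp only
      ring_nf
    · dsimp only
      by_cases hcs : c = s
      · simp [hcs]
      · rw [if_neg hcs, if_neg hcs]
        rcases hw : PySem.List.index? c "white" with _ | k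
        · dsimp only
          rcases hy : PySem.List.index? c "yellow" with _ | k
          · dsimp only
            ring_nf
          · rfl
        · rfl
  refine Eq.trans (PySem.List.foldl_congr_mem corners _
    (fun (t : Int) (c : List String) => t + contrib solved c) twists ?_)
    (PySem.List.foldl_add corners (contrib solved) twists)
  intro acc x hx
  exact hbody acc x hx

theorem cornerParity_spec : Claim_equal_cornerParity := by
  unfold Claim_equal_cornerParity
  intro corners solved swaps twists _ hPre
  unfold Spec_cornerParity cornerParity cornerParity_alt
  rcases hPre with hnil | hInv
  · subst hnil
    rfl
  · obtain ⟨hnd, hperm, htw⟩ := hInv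
    have hsub : ∀ c ∈ corners, key c ∈ solved.map key :=
      fun c hc => hperm.subset (List.mem_map_of_mem hc)
    have hpe : corners.map (fun c => (bPos solved).getD (key c) 0) = permOf corners solved :=
      perm_eq corners solved hnd hsub
    rw [hpe]
    have hmis : mis (permOf corners solved) ≤ corners.length := by
      have h1 := mis_le_length (permOf corners solved)
      rw [length_permOf] at h1
      exact h1
    have hm := main_lemma (2 * corners.length + 1) (2 * (permOf corners solved).length + 2)
      corners solved swaps twists ⟨hnd, hperm, htw⟩ (by omega) (by rw [length_permOf]; omega)
    rw [hm, bTwists_eq corners solved twists]
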